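-- pv_equiv track=rewrite | github.com/ZckFreedom/Mathworks | db_sqence/easy_db.py | lexi_order_alg_B
-- ===== SOURCE A (Python) =====
-- def get_lexicographic_number_for0(s_sequence):
-- 	size = len(s_sequence)
-- 	s_sequence += s_sequence
--
-- 	states = []
-- 	for i in range(size):
-- 		if s_sequence[i:i + size] not in states and s_sequence[i] == 0:
-- 			states.append(s_sequence[i:i + size])
--
-- 	states.sort(reverse=True)
-- 	return states.index(s_sequence[:size]), len(states)
--
-- def lexi_order_alg_B(s_sequence):
-- 	state = None
-- 	retval = []
--
-- 	while state != s_sequence: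
-- 		if state is None:
-- 			state = s_sequence[:]
--
-- 		k, m = get_lexicographic_number_for0([0] + state[1:])
-- 		if (m % 2 == 1 and k == m-1) or (m % 2 == 0 and k == m-2):
-- 			state = state[1:] + [1 - state[0]]
-- 		else:
-- 			state = state[1:] + [state[0]]
--
-- 		retval.append(state[-1])
--
-- 	return retval
-- ===== SOURCE B (Python) =====
-- def _rank0(seq):
--     # rank among distinct 0-starting rotations by direct counting (no sort, no .index)
--     n = len(seq)
--     doubled = seq + seq
--     target = tuple(seq)
--     seen = set()
--     k = 0
--     m = 0
--     for i in range(n):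
--         if doubled[i] == 0:
--             w = tuple(doubled[i:i + n])
--             if w not in seen:
--                 seen.add(w)
--                 m += 1
--                 if w > target:
--                     k += 1
--     return k, m
--
--
-- def lexi_order_alg_B(s_sequence):
--     out = []
--     state = list(s_sequence)
--     while True:
--         k, m = _rank0([0] + state[1:])
--         flip = (k == m - 2 + m % 2)
--         bit = 1 - state[0] if flip else state[0]
--         state = state[1:] + [bit]
--         out.append(bit)
--         if state == s_sequence:
--             return out
-- ===== Notes on version B (the rewrite author's own statement) =====
-- stated objective: faster
-- what changed: The rank helper no longer collects rotations into a list, sorts it descending and calls .index: it makes one pass over the doubled sequence with a set, counting the distinct 0-starting windows and how many of them are lexicographically greater than the target, and the outer loop folds the two parity branches into one closed-form test (k == m - 2 + m % 2) and appends the computed bit directly instead of re-reading the last element of state.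
import Mathlib
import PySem

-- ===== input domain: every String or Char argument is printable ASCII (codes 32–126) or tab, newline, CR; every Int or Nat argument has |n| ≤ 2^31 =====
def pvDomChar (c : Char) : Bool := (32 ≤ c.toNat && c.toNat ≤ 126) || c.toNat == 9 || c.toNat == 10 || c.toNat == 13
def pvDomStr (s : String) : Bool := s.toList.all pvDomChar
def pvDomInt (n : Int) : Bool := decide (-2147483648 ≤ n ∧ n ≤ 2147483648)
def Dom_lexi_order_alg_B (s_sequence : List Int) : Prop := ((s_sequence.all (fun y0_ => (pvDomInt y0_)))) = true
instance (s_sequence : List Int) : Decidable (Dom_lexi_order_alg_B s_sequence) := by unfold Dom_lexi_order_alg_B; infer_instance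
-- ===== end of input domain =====

-- B replaces A's rank helper (collect rotations, sort descending, .index) by a single
-- counting pass over the doubled sequence with a set, and builds the output by cons
-- instead of an accumulator; return value only, neither side mutates its argument.

-- ===== PORT A =====
-- get_lexicographic_number_for0: rotations of the doubled list, dedup + '== 0' filter,
-- sort descending, index of the original window. '.index' raises ValueError when the
-- target is absent; every call site passes a 0-headed list, whose i = 0 window is the
-- target itself, so the target is always present and '.getD 0' is never the default.
def pvGetLex0 (s0 : List Int) : Int × Int :=
  let size : Nat := s0.length
  let s : List Int := s0 ++ s0            -- s_sequence += s_sequence (local mutation only)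
  let states : List (List Int) :=
    (List.range size).foldl (fun states (i : Nat) =>
      let w := PySem.List.slice s (some (i : Int)) (some ((i : Int) + (size : Int)))
      -- s[i]: 0 ≤ i < size ≤ len s, always in range, so the default 0 is never taken
      if w ∉ states ∧ PySem.List.pyGetD s (i : Int) 0 = 0 then states ++ [w] else states) []
  let sortedStates := PySem.List.sorted states (fun x => x) true
  ((((PySem.List.index? sortedStates
        (PySem.List.slice s none (some (size : Int)))).getD 0 : Nat) : Int),
   (states.length : Int))

-- the while loop; fuel only makes the recursion structural (the step is checked after
-- updating state and appending, exactly as Python's top-of-loop test sees it)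
def pvLoopA (start : List Int) : Nat → List Int → List Int → List Int
  | 0, _, retval => retval
  | fuel + 1, state, retval =>
    let km := pvGetLex0 (0 :: PySem.List.slice state (some 1) none)
    let k := km.1
    let m := km.2
    -- state[0]: raises IndexError iff state = [], which only the empty input reaches (outside Pre_)
    let state' :=
      if (PySem.Int.mod m 2 = 1 ∧ k = m - 1) ∨ (PySem.Int.mod m 2 = 0 ∧ k = m - 2) then
        PySem.List.slice state (some 1) none ++ [1 - PySem.List.pyGetD state 0 0]
      else
        PySem.List.slice state (some 1) none ++ [PySem.List.pyGetD state 0 0]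
    let retval' := retval ++ [PySem.List.pyGetD state' (-1) 0]
    if state' = start then retval' else pvLoopA start fuel state' retval'

def lexi_order_alg_B (s_sequence : List Int) : List Int :=
  pvLoopA s_sequence (s_sequence.length * 2 ^ s_sequence.length + 1) s_sequence []

-- ===== PORT B =====
-- _rank0: one pass over the doubled list keeping (seen-set, k, m); k counts distinct
-- 0-starting windows lexicographically greater than the target, m counts them all.
def pvRank0 (seq : List Int) : Int × Int :=
  let n : Nat := seq.length
  let doubled : List Int := seq ++ seq
  let st : PySem.Set (List Int) × Int × Int :=
    (List.range n).foldl (fun st (i : Nat) =>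
      -- doubled[i]: 0 ≤ i < n ≤ len doubled, always in range
      if PySem.List.pyGetD doubled (i : Int) 0 = 0 then
        let w := PySem.List.slice doubled (some (i : Int)) (some ((i : Int) + (n : Int)))
        if PySem.Set.contains st.1 w then st
        else (PySem.Set.add st.1 w, st.2.1 + (if seq < w then 1 else 0), st.2.2 + 1)
      else st) (PySem.Set.empty, 0, 0)
  (st.2.1, st.2.2)

def pvLoopB (start : List Int) : Nat → List Int → List Int
  | 0, _ => []
  | fuel + 1, state =>
    let km := pvRank0 (0 :: PySem.List.slice state (some 1) none)
    let flip := km.1 = km.2 - 2 + PySem.Int.mod km.2 2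
    -- state[0]: raises IndexError iff state = [], which only the empty input reaches (outside Pre_)
    let bit := if flip then 1 - PySem.List.pyGetD state 0 0 else PySem.List.pyGetD state 0 0
    let state' := PySem.List.slice state (some 1) none ++ [bit]
    if state' = start then [bit] else bit :: pvLoopB start fuel state'

def lexi_order_alg_B_alt (s_sequence : List Int) : List Int :=
  pvLoopB s_sequence (s_sequence.length * 2 ^ s_sequence.length + 1) s_sequence

-- ===== PRECONDITION & SPEC =====
-- Pre_ excludes only the empty list, on which both Pythons raise IndexError (state[0]).
def Pre_lexi_order_alg_B (s_sequence : List Int) : Prop := s_sequence ≠ []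
instance (s_sequence : List Int) : Decidable (Pre_lexi_order_alg_B s_sequence) := by
  unfold Pre_lexi_order_alg_B; infer_instance
def pvWitness_lexi_order_alg_B : List Int := [0, 1]

def Spec_lexi_order_alg_B (s_sequence : List Int) (out : List Int) : Prop :=
  out = lexi_order_alg_B_alt s_sequence
instance (s_sequence : List Int) (out : List Int) : Decidable (Spec_lexi_order_alg_B s_sequence out) := by
  unfold Spec_lexi_order_alg_B; infer_instance

-- ===== CLAIM (what is proved, stated in full; the proofs are below) =====
def Claim_equal_lexi_order_alg_B : Prop :=
  ∀ (s_sequence : List Int), Dom_lexi_order_alg_B s_sequence →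
    Pre_lexi_order_alg_B s_sequence →
      Spec_lexi_order_alg_B s_sequence (lexi_order_alg_B s_sequence)

-- ===== LEMMAS AND PROOFS =====

-- the parity test of A equals B's closed form k = m - 2 + m % 2
theorem pv_cond_iff (k m : Int) :
    ((PySem.Int.mod m 2 = 1 ∧ k = m - 1) ∨ (PySem.Int.mod m 2 = 0 ∧ k = m - 2)) ↔
      k = m - 2 + PySem.Int.mod m 2 := by
  rcases PySem.Int.mod_two_eq m with h | h <;> rw [h] <;> constructor <;> intro hk
  · rcases hk with ⟨h1, _⟩ | ⟨_, h2⟩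
    · exact absurd h1 (by norm_num)
    · omega
  · exact Or.inr ⟨rfl, by omega⟩
  · rcases hk with ⟨_, h2⟩ | ⟨h1, _⟩
    · omega
    · exact absurd h1 (by norm_num)
  · exact Or.inl ⟨rfl, by omega⟩

-- A's fold step and B's fold step, shared index list: B's triple tracks A's list
theorem pv_fold_rel (s : List Int) (is : List Nat) (acc : List (List Int)) :
    is.foldl (fun (st : PySem.Set (List Int) × Int × Int) (i : Nat) =>
      if PySem.List.pyGetD (s ++ s) (i : Int) 0 = 0 then
        if PySem.Set.contains st.1 (PySem.List.slice (s ++ s) (some (i : Int)) (some ((i : Int) + (s.length : Int)))) then st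
        else (PySem.Set.add st.1 (PySem.List.slice (s ++ s) (some (i : Int)) (some ((i : Int) + (s.length : Int)))),
              st.2.1 + (if s < PySem.List.slice (s ++ s) (some (i : Int)) (some ((i : Int) + (s.length : Int))) then 1 else 0),
              st.2.2 + 1)
      else st)
      (acc, ((acc.countP (fun w => decide (s < w)) : Nat) : Int), ((acc.length : Nat) : Int))
    = (is.foldl (fun (states : List (List Int)) (i : Nat) =>
        let w := PySem.List.slice (s ++ s) (some (i : Int)) (some ((i : Int) + (s.length : Int)))
        if w ∉ states ∧ PySem.List.pyGetD (s ++ s) (i : Int) 0 = 0 then states ++ [w] else states) acc,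
       (((is.foldl (fun (states : List (List Int)) (i : Nat) =>
        let w := PySem.List.slice (s ++ s) (some (i : Int)) (some ((i : Int) + (s.length : Int)))
        if w ∉ states ∧ PySem.List.pyGetD (s ++ s) (i : Int) 0 = 0 then states ++ [w] else states) acc).countP (fun w => decide (s < w)) : Nat) : Int),
       (((is.foldl (fun (states : List (List Int)) (i : Nat) =>
        let w := PySem.List.slice (s ++ s) (some (i : Int)) (some ((i : Int) + (s.length : Int)))
        if w ∉ states ∧ PySem.List.pyGetD (s ++ s) (i : Int) 0 = 0 then states ++ [w] else states) acc).length : Nat) : Int)) := by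
  induction is generalizing acc with
  | nil => rfl
  | cons i is ih =>
    simp only [List.foldl_cons]
    set w := PySem.List.slice (s ++ s) (some (i : Int)) (some ((i : Int) + (s.length : Int))) with hwdef
    by_cases h0 : PySem.List.pyGetD (s ++ s) (i : Int) 0 = 0
    · by_cases hw : w ∈ acc
      · rw [if_pos h0, if_pos ((PySem.Set.contains_iff acc w).mpr hw),
           if_neg (fun hcc => hcc.1 hw)]
        exact ih acc
      · have hc : ¬ (PySem.Set.contains acc w = true) :=
          fun h => hw ((PySem.Set.contains_iff acc w).mp h)
        have hadd : PySem.Set.add acc w = acc ++ [w] := by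
          unfold PySem.Set.add; rw [if_neg hc]
        have hcnt : ((acc.countP (fun w' => decide (s < w')) : Nat) : Int) +
            (if s < w then (1 : Int) else 0) =
            (((acc ++ [w]).countP (fun w' => decide (s < w')) : Nat) : Int) := by
          simp only [List.countP_append]
          split <;> simp_all
        have hlen : ((acc.length : Nat) : Int) + 1 = (((acc ++ [w]).length : Nat) : Int) := by
          simp
        rw [if_pos h0, if_neg hc, if_pos (⟨hw, h0⟩ : w ∉ acc ∧ PySem.List.pyGetD (s ++ s) (i : Int) 0 = 0), hadd, hcnt, hlen]
        exact ih (acc ++ [w])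
    · rw [if_neg h0, if_neg (fun hcc => h0 hcc.2)]
      exact ih acc

-- membership is preserved by A's append-only fold
theorem pv_fold_mem (s : List Int) (is : List Nat) (acc : List (List Int)) (x : List Int)
    (hx : x ∈ acc) :
    x ∈ is.foldl (fun (states : List (List Int)) (i : Nat) =>
      let w := PySem.List.slice (s ++ s) (some (i : Int)) (some ((i : Int) + (s.length : Int)))
      if w ∉ states ∧ PySem.List.pyGetD (s ++ s) (i : Int) 0 = 0 then states ++ [w] else states) acc := by
  induction is generalizing acc with
  | nil => exact hx
  | cons i is ih =>
    simp only [List.foldl_cons]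
    split
    · exact ih _ (List.mem_append_left _ hx)
    · exact ih _ hx

-- A's fold keeps the collected list duplicate-free
theorem pv_fold_nodup (s : List Int) (is : List Nat) (acc : List (List Int)) (h : acc.Nodup) :
    (is.foldl (fun (states : List (List Int)) (i : Nat) =>
      let w := PySem.List.slice (s ++ s) (some (i : Int)) (some ((i : Int) + (s.length : Int)))
      if w ∉ states ∧ PySem.List.pyGetD (s ++ s) (i : Int) 0 = 0 then states ++ [w] else states) acc).Nodup := by
  induction is generalizing acc with
  | nil => exact h
  | cons i is ih =>
    simp only [List.foldl_cons]
    split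
    · next hc =>
        exact ih _ (List.Nodup.append h (List.nodup_singleton _) (by simpa using hc.1))
    · exact ih _ h

-- in a strictly descending list, the index of a member is the number of greater elements
theorem pv_index_count (L : List (List Int)) (t : List Int)
    (hpw : L.Pairwise (fun a b => b < a)) (ht : t ∈ L) :
    PySem.List.index? L t = some (L.countP (fun w => decide (t < w))) := by
  induction L with
  | nil => cases ht
  | cons h tl ih =>
    rcases List.pairwise_cons.mp hpw with ⟨hall, htl⟩
    by_cases he : h = t
    · subst he
      have hz : tl.countP (fun w => decide (h < w)) = 0 := by
        rw [List.countP_eq_zero]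
        intro w hw
        simp only [decide_eq_true_eq]
        exact not_lt.mpr (le_of_lt (hall w hw))
      rw [PySem.List.index?_cons_self h tl]
      simp [hz]
    · have htm : t ∈ tl := by
        rcases List.mem_cons.mp ht with h1 | h1
        · exact absurd h1.symm he
        · exact h1
      have hlt : t < h := hall t htm
      rw [PySem.List.index?_cons_of_ne tl he, ih htl htm]
      simp [hlt]

-- PySem.List.sorted is instance-irrelevant: the library order lemmas use the
-- LinearOrder (List Int) instances, the port's call infers core's; the terms coincide
theorem pv_sorted_inst (states : List (List Int)) :
    (@PySem.List.sorted (List Int) (List Int) List.instLinearOrder.toLT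
        LinearOrder.toDecidableLT states (fun x => x) true)
      = PySem.List.sorted states (fun x => x) true := by
  congr 1

-- A's sort-then-index rank is B's greater-count on a duplicate-free collection
theorem pv_index_eq_count (states : List (List Int)) (s : List Int)
    (hmem : s ∈ states) (hnodup : states.Nodup) :
    ((((PySem.List.index? (PySem.List.sorted states (fun x => x) true) s).getD 0) : Nat) : Int)
      = ((states.countP (fun w => decide (s < w)) : Nat) : Int) := by
  have hperm : (PySem.List.sorted states (fun x => x) true).Perm states :=
    PySem.List.sorted_perm states (fun x => x) true
  have hpw : (PySem.List.sorted states (fun x => x) true).Pairwise (fun a b => b < a) := by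
    have h1 : (PySem.List.sorted states (fun x => x) true).Pairwise (fun a b => b ≤ a) := by
      have h := PySem.List.sorted_pairwise_rev states (fun x : List Int => x)
      rwa [pv_sorted_inst] at h
    have h2 : (PySem.List.sorted states (fun x => x) true).Pairwise (fun a b => a ≠ b) :=
      hperm.nodup_iff.mpr hnodup
    exact (h1.and h2).imp (fun hab => lt_of_le_of_ne hab.1 (Ne.symm hab.2))
  have hmem' : s ∈ PySem.List.sorted states (fun x => x) true := (hperm.mem_iff).mpr hmem
  have hidx := pv_index_count _ s hpw hmem'
  have hcount : (PySem.List.sorted states (fun x => x) true).countP (fun w => decide (s < w)) =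
      states.countP (fun w => decide (s < w)) := hperm.countP_eq _
  rw [hidx, Option.getD_some, hcount]

-- the two rank helpers agree on every 0-headed list (the only call sites)
theorem pv_rank_eq (t : List Int) : pvGetLex0 (0 :: t) = pvRank0 (0 :: t) := by
  unfold pvGetLex0 pvRank0
  set s : List Int := 0 :: t with hs
  dsimp only
  rw [show (PySem.Set.empty : PySem.Set (List Int)) = [] from rfl]
  have hrel := pv_fold_rel s (List.range s.length) []
  simp only [List.countP_nil, Nat.cast_zero, List.length_nil] at hrel
  rw [hrel]
  set states : List (List Int) := (List.range s.length).foldl (fun (states : List (List Int)) (i : Nat) =>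
      let w := PySem.List.slice (s ++ s) (some (i : Int)) (some ((i : Int) + (s.length : Int)))
      if w ∉ states ∧ PySem.List.pyGetD (s ++ s) (i : Int) 0 = 0 then states ++ [w] else states) []
    with hstates
  -- the target window s_sequence[:size] is s itself
  have htarget : PySem.List.slice (s ++ s) none (some ((s.length : Nat) : Int)) = s := by
    rw [PySem.List.slice_to_natCast]
    exact List.take_left
  -- s ∈ states: the i = 0 window is s and is inserted first
  have hw0 : PySem.List.slice (s ++ s) (some ((0:Nat) : Int)) (some (((0:Nat) : Int) + (s.length : Int))) = s := by
    norm_num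
  have hrange : List.range s.length = 0 :: (List.range t.length).map Nat.succ := by
    rw [hs]
    simp [List.length_cons, List.range_succ_eq_map]
  have hmem : s ∈ states := by
    rw [hstates, hrange, List.foldl_cons]
    apply pv_fold_mem
    have h00 : PySem.List.pyGetD (s ++ s) ((0:Nat) : Int) 0 = 0 := by
      rw [hs]; simp
    simp only [hw0, h00]
    simp
  have hnodup : states.Nodup := pv_fold_nodup s _ [] List.nodup_nil
  rw [htarget, Prod.mk.injEq]
  exact ⟨pv_index_eq_count states s hmem hnodup, rfl⟩

-- reading the last element after appending yields the appended bit
theorem pv_last_append (l : List Int) (b : Int) :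
    PySem.List.pyGetD (l ++ [b]) (-1) 0 = b :=
  PySem.List.pyGetD_neg_one_append_singleton l b 0

-- the two while loops agree for every fuel, start and state
theorem pv_loop_eq (fuel : Nat) (start state retval : List Int) :
    pvLoopA start fuel state retval = retval ++ pvLoopB start fuel state := by
  induction fuel generalizing state retval with
  | zero => simp [pvLoopA, pvLoopB]
  | succ fuel ih =>
    rw [pvLoopA, pvLoopB]
    simp only [pv_rank_eq]
    set km := pvRank0 (0 :: PySem.List.slice state (some 1) none) with hkm
    by_cases hflip : km.1 = km.2 - 2 + PySem.Int.mod km.2 2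
    · rw [if_pos ((pv_cond_iff km.1 km.2).mpr hflip), if_pos hflip]
      rw [pv_last_append]
      split
      · rfl
      · rw [ih]; simp
    · rw [if_neg (fun hc => hflip ((pv_cond_iff km.1 km.2).mp hc)), if_neg hflip]
      rw [pv_last_append]
      split
      · rfl
      · rw [ih]; simp

-- ===== VERDICT (by name: the statement is the Claim_ definition above) =====
theorem lexi_order_alg_B_spec : Claim_equal_lexi_order_alg_B := by
  intro s_sequence _ _
  unfold Spec_lexi_order_alg_B lexi_order_alg_B lexi_order_alg_B_alt
  rw [pv_loop_eq]
  simp
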